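-- pv_equiv track=rewrite | github.com/thomasthaddeus/PythonDiscreteMath | VL03/Finished_Code/test_lab03_7.py | is_list_no_mult10
-- ===== SOURCE A (Python) =====
-- def is_list_no_mult10(list10):
--     """is_list_no_mult10"""
--     mult10_not = []
--     for i in range(int(list10[1:])):
--         if i % 10 == 0:
--             return False
--         elif i % 10 != 0:
--             continue
--         else:
--             mult10_not.append(True)
--     return True
-- ===== SOURCE B (Python) =====
-- def is_list_no_mult10(list10):
--     """is_list_no_mult10"""
--     # The loop in A returns False at i=0 (0 % 10 == 0) whenever the range is
--     # non-empty, so the whole function is the closed form below.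
--     return int(list10[1:]) <= 0
-- ===== Notes on version B (the rewrite author's own statement) =====
-- stated objective: simpler
-- what changed: A's loop always returns False at its first iteration (0 % 10 == 0), so B replaces the loop and the dead accumulator with the closed form int(list10[1:]) <= 0.
import Mathlib
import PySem

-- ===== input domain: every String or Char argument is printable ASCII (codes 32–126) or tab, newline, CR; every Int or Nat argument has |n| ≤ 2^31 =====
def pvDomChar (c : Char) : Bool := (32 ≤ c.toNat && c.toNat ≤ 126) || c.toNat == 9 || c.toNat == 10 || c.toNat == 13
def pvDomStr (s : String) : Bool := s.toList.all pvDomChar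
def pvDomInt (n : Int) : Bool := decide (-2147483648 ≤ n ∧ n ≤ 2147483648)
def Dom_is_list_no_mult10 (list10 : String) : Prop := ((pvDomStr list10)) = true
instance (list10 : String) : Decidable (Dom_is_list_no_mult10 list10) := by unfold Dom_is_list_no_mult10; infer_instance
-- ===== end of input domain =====

-- B replaces A's loop (which always returns False at its first iteration) with the closed form int(list10[1:]) <= 0.
-- ===== PORT A =====
-- literal port of A's for-loop over range(n): i runs 0,1,…; branches in source order; acc is the dead mult10_not list
def pvLoopA (n i : Int) (acc : List Bool) : Bool :=
  if i < n then
    if PySem.Int.mod i 10 == 0 then false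
    else if PySem.Int.mod i 10 != 0 then pvLoopA n (i + 1) acc
    else pvLoopA n (i + 1) (acc ++ [true])
  else true
termination_by (n - i).toNat
decreasing_by all_goals omega

def is_list_no_mult10 (list10 : String) : Bool :=
  match PySem.Int.ofStr? (PySem.Str.slice list10 (some 1) none) with
  | none => false   -- ValueError in Python; excluded by Pre_
  | some n => pvLoopA n 0 []

-- ===== PORT B =====
def is_list_no_mult10_alt (list10 : String) : Bool :=
  match PySem.Int.ofStr? (PySem.Str.slice list10 (some 1) none) with
  | none => false   -- ValueError in Python; excluded by Pre_
  | some n => decide (n ≤ 0)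

-- ===== PRECONDITION & SPEC =====
-- Pre_: int(list10[1:]) parses (otherwise Python A raises ValueError)
def Pre_is_list_no_mult10 (list10 : String) : Prop :=
  (PySem.Int.ofStr? (PySem.Str.slice list10 (some 1) none)).isSome = true
instance (list10 : String) : Decidable (Pre_is_list_no_mult10 list10) := by
  unfold Pre_is_list_no_mult10; infer_instance
def pvWitness_is_list_no_mult10 : String := "x5"
def Spec_is_list_no_mult10 (list10 : String) (out : Bool) : Prop := out = is_list_no_mult10_alt list10
instance (list10 : String) (out : Bool) : Decidable (Spec_is_list_no_mult10 list10 out) := by unfold Spec_is_list_no_mult10; infer_instance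

-- ===== CLAIM (what is proved, stated in full; the proofs are below) =====
def Claim_equal_is_list_no_mult10 : Prop := ∀ (list10 : String), Dom_is_list_no_mult10 list10 → Pre_is_list_no_mult10 list10 → Spec_is_list_no_mult10 list10 (is_list_no_mult10 list10)

-- ===== LEMMAS AND PROOFS =====

-- ===== VERDICT (by name: the statement is the Claim_ definition above) =====
lemma pvLoopA_zero (n : Int) : pvLoopA n 0 [] = decide (n ≤ 0) := by
  unfold pvLoopA
  by_cases h : (0 : Int) < n
  · simp [h, PySem.Int.mod]
  · simp [h]; omega

theorem is_list_no_mult10_spec : Claim_equal_is_list_no_mult10 := by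
  intro s _ _
  unfold Spec_is_list_no_mult10 is_list_no_mult10 is_list_no_mult10_alt
  cases PySem.Int.ofStr? (PySem.Str.slice s (some 1) none) with
  | none => rfl
  | some n => exact pvLoopA_zero n
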